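-- pv_equiv track=rewrite | github.com/crappslovinst/envault | envault/env_sort.py | _sort_by_prefix
-- ===== SOURCE A (Python) =====
-- def _sort_by_prefix(env: dict, reverse: bool = False) -> dict:
--     groups: dict[str, list] = {}
--     no_prefix = []
--
--     for key in env:
--         if "_" in key:
--             prefix = key.split("_")[0]
--             groups.setdefault(prefix, []).append(key)
--         else:
--             no_prefix.append(key)
--
--     sorted_keys = []
--     for prefix in sorted(groups.keys(), reverse=reverse):
--         sorted_keys.extend(sorted(groups[prefix], reverse=reverse))
--     sorted_keys.extend(sorted(no_prefix, reverse=reverse))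
--
--     return {k: env[k] for k in sorted_keys}
-- ===== SOURCE B (Python) =====
-- def _sort_by_prefix(env: dict, reverse: bool = False) -> dict:
--     prefixed = [k for k in env if "_" in k]
--     no_prefix = [k for k in env if "_" not in k]
--     prefixed.sort(key=lambda k: (k.split("_")[0], k), reverse=reverse)
--     no_prefix.sort(reverse=reverse)
--     return {k: env[k] for k in prefixed + no_prefix}
-- ===== Notes on version B (the rewrite author's own statement) =====
-- stated objective: simpler
-- what changed: Replaces A's build-a-prefix-group-dict-then-sort-prefixes-and-each-group-separately shape with two comprehensions and a single composite prefix-then-key sort for the underscore keys plus one plain sort for the prefix-free tail.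
import Mathlib
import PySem

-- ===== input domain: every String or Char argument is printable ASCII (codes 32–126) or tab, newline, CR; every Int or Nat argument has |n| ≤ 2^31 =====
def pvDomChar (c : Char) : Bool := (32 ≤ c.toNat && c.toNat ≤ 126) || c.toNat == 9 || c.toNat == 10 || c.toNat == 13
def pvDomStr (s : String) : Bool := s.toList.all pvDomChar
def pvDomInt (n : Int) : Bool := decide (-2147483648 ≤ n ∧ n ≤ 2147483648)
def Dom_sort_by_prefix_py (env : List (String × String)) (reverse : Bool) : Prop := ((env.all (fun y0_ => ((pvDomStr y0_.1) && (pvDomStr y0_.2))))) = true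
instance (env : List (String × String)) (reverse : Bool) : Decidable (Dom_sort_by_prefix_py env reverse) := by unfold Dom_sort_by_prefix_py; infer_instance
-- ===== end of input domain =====

-- B replaces A's group-by-prefix dict and per-group nested sorts by two filters and one
-- composite-key sort (prefix, key); objective: simpler (no measured speed claim).

-- ===== PORT A =====
-- key.split("_")[0]: split with the non-empty separator "_" always returns 'some' of a
-- non-empty list, so neither the split nor the [0] indexing can raise; exact on all inputs.
def pvPrefix (k : String) : String :=
  (((PySem.Str.split? k "_").getD []).headD "")

-- The dict parameter: 'PySem.Dict.ofList env' is dict(env) (overwrite keeps position).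
def sort_by_prefix_py (env : List (String × String)) (reverse : Bool) : List (String × String) :=
  let d := PySem.Dict.ofList env
  let st := d.keys.foldl
    (fun (st : PySem.Dict String (List String) × List String) key =>
      if PySem.Str.isIn "_" key then
        (st.1.modify (pvPrefix key) [] (fun g => g ++ [key]), st.2)
      else
        (st.1, st.2 ++ [key]))
    (PySem.Dict.empty, [])
  let groups := st.1
  let no_prefix := st.2
  let sorted_keys :=
    (PySem.List.sorted groups.keys (fun p => p) reverse).foldl
      (fun acc p => acc ++ PySem.List.sorted (groups.getD p []) (fun k => k) reverse) []
  let sorted_keys := sorted_keys ++ PySem.List.sorted no_prefix (fun k => k) reverse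
  -- {k: env[k] for k in sorted_keys}; env[k] never raises (k comes from env's keys)
  (sorted_keys.foldl (fun (out : PySem.Dict String String) k => out.insert k (d.getD k ""))
    PySem.Dict.empty).items

-- ===== PORT B =====
def sort_by_prefix_py_alt (env : List (String × String)) (reverse : Bool) : List (String × String) :=
  let d := PySem.Dict.ofList env
  let prefixed := d.keys.filter (fun k => PySem.Str.isIn "_" k)
  let no_prefix := d.keys.filter (fun k => !PySem.Str.isIn "_" k)
  let prefixedS := PySem.List.sorted2 prefixed pvPrefix (fun k => k) reverse
  let no_prefixS := PySem.List.sorted no_prefix (fun k => k) reverse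
  ((prefixedS ++ no_prefixS).foldl
    (fun (out : PySem.Dict String String) k => out.insert k (d.getD k ""))
    PySem.Dict.empty).items

-- ===== PRECONDITION & SPEC =====
def Spec_sort_by_prefix_py (env : List (String × String)) (reverse : Bool) (out : List (String × String)) : Prop := out = sort_by_prefix_py_alt env reverse
instance (env : List (String × String)) (reverse : Bool) (out : List (String × String)) : Decidable (Spec_sort_by_prefix_py env reverse out) := by unfold Spec_sort_by_prefix_py; infer_instance

-- ===== CLAIM (what is proved, stated in full; the proofs are below) =====
def Claim_equal_sort_by_prefix_py : Prop := ∀ (env : List (String × String)) (reverse : Bool), Dom_sort_by_prefix_py env reverse → Spec_sort_by_prefix_py env reverse (sort_by_prefix_py env reverse)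


-- ===== LEMMAS AND PROOFS =====

-- the lexicographic composite key (k.split("_")[0], k)
def pvLexKey (k : String) : Lex (String × String) := toLex (pvPrefix k, k)

-- Python's tuple-key sort IS the sort by the lexicographic product order.
theorem pv_sorted2_eq_sorted_lex (xs : List String) (rev : Bool) :
    PySem.List.sorted2 xs pvPrefix (fun k => k) rev = PySem.List.sorted xs pvLexKey rev := by
  have hbe : (fun a b : String => decide (pvPrefix a < pvPrefix b) || (!decide (pvPrefix b < pvPrefix a) && decide (a < b)))
      = (fun a b : String => decide (pvLexKey a < pvLexKey b)) := by
    funext a b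
    by_cases h1 : pvPrefix a < pvPrefix b
    · simp [pvLexKey, Prod.Lex.lt_iff, h1]
    · by_cases h2 : pvPrefix b < pvPrefix a
      · have hne : pvPrefix a ≠ pvPrefix b := ne_of_gt h2
        simp [pvLexKey, Prod.Lex.lt_iff, h1, h2, hne]
      · have he : pvPrefix a = pvPrefix b := le_antisymm (not_lt.mp h2) (not_lt.mp h1)
        simp [pvLexKey, Prod.Lex.lt_iff, he]
  have hbe' : (fun a b : String => decide (pvPrefix b < pvPrefix a) || (!decide (pvPrefix a < pvPrefix b) && decide (b < a)))
      = (fun a b : String => decide (pvLexKey b < pvLexKey a)) := by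
    funext a b; exact congrFun (congrFun hbe b) a
  cases rev <;> simp only [PySem.List.sorted2, PySem.List.sorted, hbe, hbe']

-- splitting A's single loop with a pair accumulator into the two filters
theorem pv_loop_split (ks : List String) :
    ks.foldl
      (fun (st : PySem.Dict String (List String) × List String) key =>
        if PySem.Str.isIn "_" key then
          (st.1.modify (pvPrefix key) [] (fun g => g ++ [key]), st.2)
        else
          (st.1, st.2 ++ [key]))
      (PySem.Dict.empty, []) =
      ((ks.filter (fun k => PySem.Str.isIn "_" k)).foldl
          (fun (g : PySem.Dict String (List String)) k =>
            g.modify (pvPrefix k) [] (fun g => g ++ [k])) PySem.Dict.empty,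
        ks.filter (fun k => !PySem.Str.isIn "_" k)) := by
  have h1 : (fun (st : PySem.Dict String (List String) × List String) key =>
        if PySem.Str.isIn "_" key then
          (st.1.modify (pvPrefix key) [] (fun g => g ++ [key]), st.2)
        else
          (st.1, st.2 ++ [key]))
      = (fun (st : PySem.Dict String (List String) × List String) key =>
          ((fun (g : PySem.Dict String (List String)) k =>
              if PySem.Str.isIn "_" k then g.modify (pvPrefix k) [] (fun g => g ++ [k]) else g) st.1 key,
           (fun (l : List String) k => if !PySem.Str.isIn "_" k then l ++ [k] else l) st.2 key)) := by
    funext st key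
    beta_reduce
    cases h : PySem.Str.isIn "_" key <;> rfl
  rw [h1, PySem.List.foldl_prod_mk
      (f := fun (g : PySem.Dict String (List String)) k =>
        if PySem.Str.isIn "_" k then g.modify (pvPrefix k) [] (fun g => g ++ [k]) else g)
      (g := fun (l : List String) k => if !PySem.Str.isIn "_" k then l ++ [k] else l),
    PySem.List.foldl_if_eq_foldl_filter,
    PySem.List.foldl_append_if_eq_filter, List.nil_append]

-- the group dict's keys: first occurrences of the prefixes, in order
theorem pv_groups_keys (xs : List String) :
    ((xs.foldl (fun (g : PySem.Dict String (List String)) k =>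
        g.modify (pvPrefix k) [] (fun g => g ++ [k])) PySem.Dict.empty).keys)
      = PySem.Set.ofList (xs.map pvPrefix) := by
  rw [PySem.Dict.keys_foldl_modify_key (key := pvPrefix) (d0 := [])
    (f := fun _ k g => g ++ [k]) (d := PySem.Dict.empty)]
  rw [PySem.Dict.keys_empty, PySem.Set.update_nil_left]

-- the group at p holds exactly the keys with prefix p, in input order
theorem pv_groups_getD (xs : List String) (p : String) :
    ((xs.foldl (fun (g : PySem.Dict String (List String)) k =>
        g.modify (pvPrefix k) [] (fun g => g ++ [k])) PySem.Dict.empty).getD p [])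
      = xs.filter (fun k => pvPrefix k == p) := by
  have h : xs.foldl (fun (g : PySem.Dict String (List String)) k =>
        g.modify (pvPrefix k) [] (fun g => g ++ [k])) PySem.Dict.empty
      = (xs.map (fun k => (pvPrefix k, k))).foldl
          (fun (g : PySem.Dict String (List String)) q =>
            g.modify q.1 [] (fun g => g ++ [q.2])) PySem.Dict.empty := by
    rw [List.foldl_map]
  rw [h, PySem.Dict.getD_foldl_modify_append]
  simp [List.filter_map, Function.comp_def]

-- pointwise permutation congruence for flatMap
theorem pv_flatMap_perm {a b : Type} (g h : a → List b) (l : List a)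
    (hp : ∀ p ∈ l, (g p).Perm (h p)) : (l.flatMap g).Perm (l.flatMap h) := by
  induction l with
  | nil => simp
  | cons p l ih =>
    simp only [List.flatMap_cons]
    exact (hp p (by simp)).append (ih (fun q hq => hp q (by simp [hq])))

-- a nodup list of group labels covering f's image reassembles xs
theorem pv_perm_flatMap_filter {a k : Type} [BEq k] [LawfulBEq k] (f : a → k)
    (ps : List k) (xs : List a) (hnd : ps.Nodup) (hcov : ∀ x ∈ xs, f x ∈ ps) :
    (ps.flatMap (fun p => xs.filter (fun x => f x == p))).Perm xs := by
  induction ps generalizing xs with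
  | nil =>
    cases xs with
    | nil => simp
    | cons y ys => exact absurd (hcov y (by simp)) (by simp)
  | cons p ps ih =>
    have hnd' := List.nodup_cons.mp hnd
    have hstep : ps.flatMap (fun q => xs.filter (fun x => f x == q))
        = ps.flatMap (fun q => (xs.filter (fun x => !(f x == p))).filter (fun x => f x == q)) := by
      rw [List.flatMap_def, List.flatMap_def,
        List.map_congr_left (fun q hq => ?_)]
      rw [List.filter_filter]
      refine (List.filter_congr (fun x _ => ?_)).symm
      by_cases hfx : f x = q
      · cases hfx
        have hne : (f x == p) = false := by
          refine beq_eq_false_iff_ne.mpr (fun hc => hnd'.1 ?_)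
          exact hc ▸ hq
        simp [hne]
      · simp [hfx]
    simp only [List.flatMap_cons]
    rw [hstep]
    refine List.Perm.trans (List.Perm.append_left _
      (ih (xs.filter (fun x => !(f x == p))) hnd'.2 (fun x hx => ?_)))
      (List.filter_append_perm _ xs)
    have hxs := List.mem_filter.mp hx
    have hmem := hcov x hxs.1
    simp only [List.mem_cons] at hmem
    rcases hmem with h | h
    · exact absurd (beq_iff_eq.mpr h) (by simpa using hxs.2)
    · exact h

-- the core: group-then-sort-each-group equals the single composite-key sort
theorem pv_grouped_eq_sorted2 (xs : List String) (hnd : xs.Nodup) (rev : Bool) :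
    (PySem.List.sorted (PySem.Set.ofList (xs.map pvPrefix)) (fun p => p) rev).foldl
        (fun acc p => acc ++ PySem.List.sorted (xs.filter (fun k => pvPrefix k == p)) (fun k => k) rev) []
      = PySem.List.sorted2 xs pvPrefix (fun k => k) rev := by
  rw [pv_sorted2_eq_sorted_lex, PySem.List.foldl_append_eq_flatMap, List.nil_append]
  have hpsperm : (PySem.List.sorted (PySem.Set.ofList (xs.map pvPrefix)) (fun p => p) rev).Perm
      (PySem.Set.ofList (xs.map pvPrefix)) := PySem.List.sorted_perm _ _ _
  have hpsnd : (PySem.List.sorted (PySem.Set.ofList (xs.map pvPrefix)) (fun p => p) rev).Nodup :=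
    hpsperm.nodup_iff.mpr (PySem.Set.nodup_ofList _)
  have hperm : ((PySem.List.sorted (PySem.Set.ofList (xs.map pvPrefix)) (fun p => p) rev).flatMap
      (fun p => PySem.List.sorted (xs.filter (fun k => pvPrefix k == p)) (fun k => k) rev)).Perm xs := by
    refine List.Perm.trans
      (pv_flatMap_perm _ (fun p => xs.filter (fun k => pvPrefix k == p)) _
        (fun p _ => PySem.List.sorted_perm _ _ _))
      (pv_perm_flatMap_filter pvPrefix _ xs hpsnd (fun x hx => ?_))
    rw [PySem.List.mem_sorted]
    exact (PySem.Set.mem_ofList _ _).mpr (List.mem_map_of_mem hx)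
  -- membership in a block pins the prefix
  have hpin : ∀ (p : String) (x : String) (r : Bool),
      x ∈ PySem.List.sorted (xs.filter (fun k => pvPrefix k == p)) (fun k => k) r → pvPrefix x = p := by
    intro p x r hxmem
    have := (List.mem_filter.mp ((PySem.List.mem_sorted _ _ _ _).mp hxmem)).2
    simpa using this
  have hblocknd : ∀ (p : String) (r : Bool),
      (PySem.List.sorted (xs.filter (fun k => pvPrefix k == p)) (fun k => k) r).Nodup :=
    fun p r => (PySem.List.sorted_perm _ _ _).nodup_iff.mpr (hnd.filter _)
  cases rev with
  | false =>
    refine (PySem.List.sorted_eq_of_perm_of_pairwise_lt xs _ pvLexKey hperm ?_).symm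
    rw [List.pairwise_flatMap]
    constructor
    · intro p _
      refine ((PySem.List.sorted_pairwise (xs.filter (fun k => pvPrefix k == p)) (fun k => k)).and
        (hblocknd p false)).imp_of_mem (fun {x y} hx hy hxy => ?_)
      refine Prod.Lex.lt_iff.mpr (Or.inr ?_)
      exact ⟨(hpin p x false hx).trans (hpin p y false hy).symm,
        lt_of_le_of_ne hxy.1 hxy.2⟩
    · refine (PySem.List.sorted_ofList_pairwise_lt (xs.map pvPrefix)).imp ?_
      intro p q hpq x hx y hy
      exact Prod.Lex.lt_iff.mpr (Or.inl (show pvPrefix x < pvPrefix y by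
        rw [hpin p x false hx, hpin q y false hy]; exact hpq))
  | true =>
    refine (PySem.List.sorted_rev_eq_of_perm_of_pairwise_gt xs _ pvLexKey hperm ?_).symm
    rw [List.pairwise_flatMap]
    constructor
    · intro p _
      refine ((PySem.List.sorted_pairwise_rev (xs.filter (fun k => pvPrefix k == p)) (fun k => k)).and
        (hblocknd p true)).imp_of_mem (fun {x y} hx hy hxy => ?_)
      refine Prod.Lex.lt_iff.mpr (Or.inr ?_)
      exact ⟨(hpin p y true hy).trans (hpin p x true hx).symm,
        lt_of_le_of_ne hxy.1 (fun hc => hxy.2 hc.symm)⟩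
    · have hgt : List.Pairwise (fun p q => q < p)
          (PySem.List.sorted (PySem.Set.ofList (xs.map pvPrefix)) (fun p => p) true) :=
        ((PySem.List.sorted_pairwise_rev (PySem.Set.ofList (xs.map pvPrefix)) (fun p => p)).and
          hpsnd).imp (fun hpq => lt_of_le_of_ne hpq.1 (fun hc => hpq.2 hc.symm))
      refine hgt.imp ?_
      intro p q hpq x hx y hy
      exact Prod.Lex.lt_iff.mpr (Or.inl (show pvPrefix y < pvPrefix x by
        rw [hpin p x true hx, hpin q y true hy]; exact hpq))


-- ===== VERDICT (by name: the statement is the Claim_ definition above) =====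
theorem sort_by_prefix_py_spec : Claim_equal_sort_by_prefix_py := by
  intro env reverse _
  show sort_by_prefix_py env reverse = sort_by_prefix_py_alt env reverse
  simp only [sort_by_prefix_py, sort_by_prefix_py_alt]
  rw [pv_loop_split]
  simp only [pv_groups_keys, pv_groups_getD]
  rw [pv_grouped_eq_sorted2 _ ((PySem.Dict.nodup_keys_ofList env).filter _) reverse]
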